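-- pv_equiv track=rewrite | github.com/vakhutinnikita/file-parser | parse_file.py | create_document
-- ===== SOURCE A (Python) =====
-- from typing import List, Dict, Tuple, Optional, Union, Iterator, TextIO
--
-- def create_document(doc_lines: List[Tuple[Optional[str], str]]) -> Dict[str, str]:
--     """ Creates document object from the list of lines
--
--     :param doc_lines: List of document lines
--     :type doc_lines: List[Tuple[Optional[str], str]]
--     :return: Document object
--     :rtype: Dict[str, str]
--     """
--
--     doc: Dict[str, str] = {}
--     key: Optional[str] = None
--     for line in doc_lines:
--         key = line[0] or key
--         if key not in doc:
--             doc[key] = ''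
--         else:
--             doc[key] += '\n'
--         doc[key] += line[1]
--     return doc
-- ===== SOURCE B (Python) =====
-- from typing import List, Dict, Tuple, Optional
--
--
-- def create_document(doc_lines: List[Tuple[Optional[str], str]]) -> Dict[str, str]:
--     """Staged rewrite: resolve carried keys up front, then build the document
--     key-by-key, gathering each key's line texts with a per-key scan."""
--     resolved: List[Tuple[Optional[str], str]] = []
--     key: Optional[str] = None
--     for line in doc_lines:
--         key = line[0] or key
--         resolved.append((key, line[1]))
--     return {k: '\n'.join(t for kk, t in resolved if kk == k)
--             for k in dict.fromkeys(kk for kk, _ in resolved)}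
-- ===== Notes on version B (the rewrite author's own statement) =====
-- stated objective: alternative
-- what changed: Replaces A's single-pass dict accumulation (first-time/'\n'-prepend branch plus in-place string concatenation per line) by staged passes: resolve the carried keys into (key, text) pairs, take the keys in first-occurrence order with dict.fromkeys, and build the document key-by-key, gathering each key's texts with a per-key scan over the resolved list and joining them once.
-- outside the precondition, e.g. on create_document([(None, 'x')]): A returns {None: 'x'}, B returns {None: 'x'}; on create_document([('', 'x'), ('a', 'y')]): A returns {None: 'x', 'a': 'y'}, B returns {None: 'x', 'a': 'y'}
import Mathlib
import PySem

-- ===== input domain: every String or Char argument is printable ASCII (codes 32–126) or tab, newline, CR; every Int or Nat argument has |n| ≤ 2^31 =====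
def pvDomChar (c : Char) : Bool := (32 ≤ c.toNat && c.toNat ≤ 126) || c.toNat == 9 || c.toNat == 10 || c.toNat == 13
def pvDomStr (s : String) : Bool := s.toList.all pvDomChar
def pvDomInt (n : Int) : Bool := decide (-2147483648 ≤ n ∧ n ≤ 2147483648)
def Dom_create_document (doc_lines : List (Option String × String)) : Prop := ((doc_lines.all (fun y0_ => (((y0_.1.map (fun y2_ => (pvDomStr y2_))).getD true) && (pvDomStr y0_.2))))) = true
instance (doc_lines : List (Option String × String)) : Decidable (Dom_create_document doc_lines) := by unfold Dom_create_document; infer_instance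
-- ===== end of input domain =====

-- B replaces A's single-pass dict accumulation (first-time/'\n'-prepend branch, in-place
-- string concatenation) by staged passes: resolve the carried keys, then build the result
-- key-by-key, gathering each key's texts with a per-key scan and one join.

-- ===== PORT A =====
-- The carried `key` starts as Python's None; Pre_ below guarantees a real key is
-- assigned on the first line, so the initial value is never used as a dict key and
-- is represented by "".
def create_document (doc_lines : List (Option String × String)) : List (String × String) :=
  (doc_lines.foldl
    (fun (st : PySem.Dict String String × String) (line : Option String × String) =>
      -- key = line[0] or key   (line[0] is falsy iff it is None or '')
      let key : String := match line.1 with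
        | some s => if s = "" then st.2 else s
        | none => st.2
      -- if key not in doc: doc[key] = ''  else: doc[key] += '\n'
      let doc := if st.1.contains key then st.1.modify key "" (fun v => v ++ "\n")
                 else st.1.insert key ""
      -- doc[key] += line[1]
      (doc.modify key "" (fun v => v ++ line.2), key))
    (PySem.Dict.empty, "")).1.items

-- ===== PORT B =====
def create_document_alt (doc_lines : List (Option String × String)) : List (String × String) :=
  -- first pass: key = line[0] or key; resolved.append((key, line[1]))
  let resolved : List (String × String) :=
    (doc_lines.foldl
      (fun (st : List (String × String) × String) (line : Option String × String) =>
        let key : String := match line.1 with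
          | some s => if s = "" then st.2 else s
          | none => st.2
        (st.1 ++ [(key, line.2)], key))
      ([], "")).1
  -- dict comprehension: keys in first-occurrence order (dict.fromkeys), one per-key
  -- gather '\n'.join(t for kk, t in resolved if kk == k)
  (PySem.List.dedup (resolved.map Prod.fst)).map
    (fun k => (k, PySem.Str.join "\n" ((resolved.filter (fun p => p.1 == k)).map Prod.snd)))

-- ===== PRECONDITION & SPEC =====
-- Pre_ excludes inputs whose first line carries no key (None or ''): there Python A
-- keys the dict by None, and its value {None: …} is not of the declared Dict[str, str] type.
def Pre_create_document (doc_lines : List (Option String × String)) : Prop :=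
  (doc_lines.headD (some "k", "")).1.getD "" ≠ ""
instance (doc_lines : List (Option String × String)) : Decidable (Pre_create_document doc_lines) := by unfold Pre_create_document; infer_instance

def pvWitness_create_document : (List (Option String × String)) :=
  [(some "a", "x"), (none, "y"), (some "b", "z"), (some "a", "w")]

def Spec_create_document (doc_lines : List (Option String × String)) (out : List (String × String)) : Prop := out = create_document_alt doc_lines
instance (doc_lines : List (Option String × String)) (out : List (String × String)) : Decidable (Spec_create_document doc_lines out) := by unfold Spec_create_document; infer_instance

-- ===== CLAIM (what is proved, stated in full; the proofs are below) =====
def Claim_equal_create_document : Prop := ∀ (doc_lines : List (Option String × String)), Dom_create_document doc_lines → Pre_create_document doc_lines → Spec_create_document doc_lines (create_document doc_lines)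

-- ===== LEMMAS AND PROOFS =====

-- A's loop body, named so the fold lemmas can speak about it
def pvAstep (st : PySem.Dict String String × String) (line : Option String × String) :
    PySem.Dict String String × String :=
  let key : String := match line.1 with
    | some s => if s = "" then st.2 else s
    | none => st.2
  let doc := if st.1.contains key then st.1.modify key "" (fun v => v ++ "\n")
             else st.1.insert key ""
  (doc.modify key "" (fun v => v ++ line.2), key)

-- B's resolve-pass body
def pvRstep (st : List (String × String) × String) (line : Option String × String) :
    List (String × String) × String :=
  let key : String := match line.1 with
    | some s => if s = "" then st.2 else s
    | none => st.2
  (st.1 ++ [(key, line.2)], key)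

-- the resolved (key, text) list as a pure function of the lines and the carried key
def pvRes : List (Option String × String) → String → List (String × String)
  | [], _ => []
  | l :: ls, k0 =>
    let key : String := match l.1 with
      | some s => if s = "" then k0 else s
      | none => k0
    (key, l.2) :: pvRes ls key

-- the grouping step over resolved pairs
def pvSeg (d : PySem.Dict String (List String)) (p : String × String) :
    PySem.Dict String (List String) :=
  d.modify p.1 [] (fun l => l ++ [p.2])

-- A's grouped dict viewed entry-wise through '\n'-joining
def mjoin (d : PySem.Dict String (List String)) : PySem.Dict String String :=
  ⟨d.items.map (fun p => (p.1, PySem.Str.join "\n" p.2))⟩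

theorem intercalate_snoc (s x : List Char) (l : List (List Char)) (h : l ≠ []) :
    s.intercalate (l ++ [x]) = s.intercalate l ++ s ++ x := by
  induction l with
  | nil => simp at h
  | cons a t ih =>
    cases t with
    | nil => simp [List.intercalate]
    | cons b t2 =>
      have e1 : s.intercalate (a :: ((b :: t2) ++ [x])) = a ++ s ++ s.intercalate ((b :: t2) ++ [x]) := by
        cases t2 <;> simp [List.intercalate]
      have e2 : s.intercalate (a :: b :: t2) = a ++ s ++ s.intercalate (b :: t2) := by
        simp [List.intercalate]
      have e3 := ih (by simp)
      simp only [List.cons_append] at e1 e3 ⊢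
      rw [e1, e2, e3]
      simp [List.append_assoc]

theorem join_singleton (v : String) : PySem.Str.join "\n" [v] = v := by
  simp [PySem.Str.join, PySem.Chars.join, List.intercalate, String.ofList_toList]

theorem join_snoc (l : List String) (v : String) (h : l ≠ []) :
    PySem.Str.join "\n" (l ++ [v]) = PySem.Str.join "\n" l ++ "\n" ++ v := by
  have hl : l.map String.toList ≠ [] := by simpa using h
  apply String.toList_inj.mp
  simp only [PySem.Str.join, PySem.Chars.join, List.map_append, List.map_cons, List.map_nil,
    String.toList_append, String.toList_ofList]
  rw [intercalate_snoc _ _ _ hl]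

theorem mjoin_contains (d : PySem.Dict String (List String)) (k : String) :
    (mjoin d).contains k = d.contains k := by
  simp [mjoin, PySem.Dict.contains, List.any_map, Function.comp_def]

theorem mjoin_get? (d : PySem.Dict String (List String)) (k : String) :
    (mjoin d).get? k = (d.get? k).map (PySem.Str.join "\n") := by
  simp [mjoin, PySem.Dict.get?, List.find?_map, Function.comp_def, Option.map_map]

theorem mjoin_insert (d : PySem.Dict String (List String)) (k : String) (l : List String) :
    (mjoin d).insert k (PySem.Str.join "\n" l) = mjoin (d.insert k l) := by
  simp only [PySem.Dict.insert, mjoin_contains]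
  by_cases hc : d.contains k = true
  · simp only [hc, if_pos, mjoin, List.map_map]
    congr 1
    apply List.map_congr_left
    intro p _
    by_cases hk : p.1 = k <;> simp [hk]
  · simp [hc, mjoin]

theorem get?_of_not_contains (d : PySem.Dict String (List String)) (k : String)
    (h : d.contains k = false) : d.get? k = none := by
  simp only [PySem.Dict.contains, List.any_eq_false] at h
  simp only [PySem.Dict.get?]
  rw [List.find?_eq_none.mpr]
  · rfl
  · intro q hq; simpa using h q hq

theorem get?_of_contains (d : PySem.Dict String (List String)) (k : String)
    (h : d.contains k = true) : ∃ l, d.get? k = some l := by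
  simp only [PySem.Dict.contains, List.any_eq_true] at h
  obtain ⟨q, hq, hqk⟩ := h
  rcases hfind : List.find? (fun p => p.1 == k) d.items with _ | q'
  · exact absurd hqk (by simpa using List.find?_eq_none.mp hfind q hq)
  · exact ⟨q'.2, by simp [PySem.Dict.get?, hfind]⟩

theorem get?_ne_nil (d : PySem.Dict String (List String)) (k : String) (l : List String)
    (h : ∀ p ∈ d.items, p.2 ≠ []) (hg : d.get? k = some l) : l ≠ [] := by
  simp only [PySem.Dict.get?, Option.map_eq_some_iff] at hg
  obtain ⟨q, hq, rfl⟩ := hg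
  exact h q (List.mem_of_find?_eq_some hq)

-- A's branch-then-append collapses to a single insert of the final string
theorem astep_collapse (doc : PySem.Dict String String) (k v : String) :
    ((if doc.contains k then doc.modify k "" (fun s => s ++ "\n") else doc.insert k "").modify
      k "" (fun s => s ++ v))
    = doc.insert k ((if doc.contains k then doc.getD k "" ++ "\n" else "") ++ v) := by
  by_cases hc : doc.contains k = true
  · simp [hc, PySem.Dict.modify, PySem.Dict.getD_insert_self, PySem.Dict.insert_insert_self]
  · simp [hc, PySem.Dict.modify, PySem.Dict.getD_insert_self, PySem.Dict.insert_insert_self]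

theorem mem_insert_items (d : PySem.Dict String (List String)) (k : String) (w : List String)
    (p : String × List String) (hp : p ∈ (d.insert k w).items) : p.2 = w ∨ p ∈ d.items := by
  simp only [PySem.Dict.insert] at hp
  by_cases hc : d.contains k = true
  · simp only [hc, if_pos] at hp
    obtain ⟨q, hq, hpq⟩ := List.mem_map.mp hp
    by_cases hk : (q.1 == k) = true
    · left; simp [hk] at hpq; simp [← hpq]
    · right; simp [hk] at hpq; simpa [hpq] using hq
  · simp only [hc, if_neg, Bool.false_eq_true, not_false_iff, List.mem_append,
      List.mem_singleton] at hp
    rcases hp with hp | hp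
    · right; exact hp
    · left; simp [hp]

theorem seg_preserves (d : PySem.Dict String (List String)) (k v : String)
    (h : ∀ p ∈ d.items, p.2 ≠ []) :
    ∀ p ∈ (d.modify k [] (fun l => l ++ [v])).items, p.2 ≠ [] := by
  intro p hp
  simp only [PySem.Dict.modify] at hp
  rcases mem_insert_items _ _ _ _ hp with he | he
  · simp [he]
  · exact h p he

-- one loop step of A is the mjoin image of one grouping step
theorem step_rel (d : PySem.Dict String (List String)) (k0 : String)
    (line : Option String × String) (h : ∀ p ∈ d.items, p.2 ≠ []) :
    pvAstep (mjoin d, k0) line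
      = (let key : String := match line.1 with
          | some s => if s = "" then k0 else s
          | none => k0
        (mjoin (pvSeg d (key, line.2)), key)) := by
  simp only [pvAstep, pvSeg, astep_collapse]
  have hkey : ∀ key : String,
      (mjoin d).insert key ((if (mjoin d).contains key then (mjoin d).getD key "" ++ "\n" else "") ++ line.2)
        = mjoin (d.modify key [] (fun l => l ++ [line.2])) := by
    intro key
    rw [mjoin_contains]
    by_cases hc : d.contains key = true
    · obtain ⟨l, hl⟩ := get?_of_contains d key hc
      have hlne : l ≠ [] := get?_ne_nil d key l h hl
      have hgd : (mjoin d).getD key "" = PySem.Str.join "\n" l := by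
        simp [PySem.Dict.getD, mjoin_get?, hl]
      have hgd' : d.getD key [] = l := by simp [PySem.Dict.getD, hl]
      rw [if_pos hc, hgd]
      have : PySem.Str.join "\n" l ++ "\n" ++ line.2 = PySem.Str.join "\n" (l ++ [line.2]) := by
        rw [join_snoc l line.2 hlne]
      rw [String.append_assoc, ← String.append_assoc, this, mjoin_insert,
        PySem.Dict.modify, hgd']
    · have hgd' : d.getD key [] = [] := by
        simp [PySem.Dict.getD, get?_of_not_contains d key (by simpa using hc)]
      have : ("" : String) ++ line.2 = PySem.Str.join "\n" [line.2] := by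
        rw [join_singleton]; simp
      rw [if_neg hc, this, mjoin_insert, PySem.Dict.modify, hgd']
      simp
  exact congrArg (fun x => (x, _)) (hkey _)

-- A's fold is mjoin of the grouping fold over the resolved pairs
theorem fold_rel (lines : List (Option String × String)) :
    ∀ (d : PySem.Dict String (List String)) (k0 : String), (∀ p ∈ d.items, p.2 ≠ []) →
    (lines.foldl pvAstep (mjoin d, k0)).1 = mjoin ((pvRes lines k0).foldl pvSeg d) := by
  induction lines with
  | nil => intro d k0 _; rfl
  | cons line rest ih =>
    intro d k0 h
    rw [List.foldl_cons, step_rel d k0 line h]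
    exact ih _ _ (seg_preserves d _ _ h)

-- B's resolve pass computes pvRes
theorem rfold_res (lines : List (Option String × String)) :
    ∀ (acc : List (String × String)) (k0 : String),
    (lines.foldl pvRstep (acc, k0)).1 = acc ++ pvRes lines k0 := by
  induction lines with
  | nil => intro acc k0; simp [pvRes]
  | cons line rest ih =>
    intro acc k0
    rw [List.foldl_cons]
    simp only [pvRstep, pvRes]
    rw [ih]
    simp

theorem create_document_spec : Claim_equal_create_document := by
  intro doc_lines _ _
  unfold Spec_create_document
  -- name the resolved list
  set rs := pvRes doc_lines "" with hrs
  -- A's side: fold = mjoin of the grouping fold over rs, whose items we characterise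
  have hA : create_document doc_lines = (mjoin (rs.foldl pvSeg PySem.Dict.empty)).items := by
    have := fold_rel doc_lines PySem.Dict.empty "" (by simp [PySem.Dict.empty])
    simpa [create_document, pvAstep, mjoin, PySem.Dict.empty] using
      congrArg PySem.Dict.items this
  -- B's side: the resolve fold yields rs
  have hB : create_document_alt doc_lines
      = (PySem.List.dedup (rs.map Prod.fst)).map
          (fun k => (k, PySem.Str.join "\n" ((rs.filter (fun p => p.1 == k)).map Prod.snd))) := by
    simp only [create_document_alt]
    rw [show (fun (st : List (String × String) × String) (line : Option String × String) =>
      let key : String := match line.1 with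
        | some s => if s = "" then st.2 else s
        | none => st.2
      (st.1 ++ [(key, line.2)], key)) = pvRstep from rfl]
    rw [rfold_res doc_lines [] ""]
    simp only [List.nil_append]
    rw [← hrs]
  rw [hA, hB]
  -- items of the grouping fold, via the library characterisation
  set S := rs.foldl pvSeg PySem.Dict.empty with hS
  have hseg : S = rs.foldl (fun d p => d.modify p.1 [] (fun l => l ++ [p.2])) PySem.Dict.empty := rfl
  have hnd : S.keys.Nodup := by
    rw [hseg]
    exact PySem.Dict.nodup_keys_foldl_modify_key rs Prod.fst [] _ PySem.Dict.empty
      (by simp [PySem.Dict.keys_empty])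
  have hkeys : S.keys = PySem.List.dedup (rs.map Prod.fst) := by
    rw [hseg, PySem.Dict.keys_foldl_modify_key]
    simp [PySem.Dict.keys_empty, PySem.Set.update, PySem.List.dedup_eq_ofList,
      PySem.Set.ofList]
  have hget : ∀ k, S.getD k [] = (rs.filter (fun p => p.1 == k)).map Prod.snd := by
    intro k
    rw [hseg, PySem.Dict.getD_foldl_modify_append]
    simp [PySem.Dict.getD_empty]
  have hitems : S.items = S.keys.map (fun k => (k, S.getD k [])) :=
    PySem.Dict.items_eq_map_keys S hnd []
  simp only [mjoin, hitems, hkeys, List.map_map]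
  apply List.map_congr_left
  intro k _
  simp [hget k]
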